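-- pv_equiv track=rewrite | github.com/jeet1912/leetcode | arrays_and_strings/prefix_sum.py | problem1
-- ===== SOURCE A (Python) =====
-- def problem1(nums,queries,limit):
--     prefix_sum = [nums[0]]
--     for i in range(1,len(nums)):
--         prefix_sum.append(nums[i] + prefix_sum[-1])
--     ans = []
--     for x,y in queries:
--         sum = prefix_sum[y] - prefix_sum[x] + nums[x]
--         ans.append(sum<limit)
--     return ans
-- ===== SOURCE B (Python) =====
-- def problem1(nums, queries, limit):
--     def upto(i):
--         # inclusive prefix sum nums[0] + ... + nums[i], computed on the fly
--         return sum(nums[:i]) + nums[i]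
--     return [upto(y) - upto(x) + nums[x] < limit for x, y in queries]
-- ===== Notes on version B (the rewrite author's own statement) =====
-- stated objective: simpler
-- what changed: Drops the prefix-sum table precomputation: each query is answered by an on-the-fly inclusive prefix sum upto(i) = sum(nums[:i]) + nums[i], in a single comprehension; the C-level slice+sum avoids A's per-element Python loop building the table.
import Mathlib
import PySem

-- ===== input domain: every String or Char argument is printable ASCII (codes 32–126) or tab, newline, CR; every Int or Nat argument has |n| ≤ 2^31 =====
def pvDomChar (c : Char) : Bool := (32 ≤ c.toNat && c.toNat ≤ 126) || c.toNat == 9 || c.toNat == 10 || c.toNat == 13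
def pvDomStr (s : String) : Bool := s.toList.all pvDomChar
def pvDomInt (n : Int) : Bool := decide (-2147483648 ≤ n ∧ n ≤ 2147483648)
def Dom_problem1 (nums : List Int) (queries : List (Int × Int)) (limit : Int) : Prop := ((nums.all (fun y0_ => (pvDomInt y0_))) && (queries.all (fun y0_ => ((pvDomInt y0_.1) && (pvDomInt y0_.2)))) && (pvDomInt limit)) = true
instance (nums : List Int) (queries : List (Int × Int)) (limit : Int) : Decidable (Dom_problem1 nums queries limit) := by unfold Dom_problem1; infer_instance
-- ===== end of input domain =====

-- B drops A's prefix-sum table and answers each query directly as a difference of two prefix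
-- slice sums (simpler, not faster).


-- ===== PORT A =====
def problem1 (nums : List Int) (queries : List (Int × Int)) (limit : Int) : List Bool :=
  let prefix_sum := (PySem.List.pyRange 1 (nums.length : Int) 1).foldl
    (fun ps i => ps ++ [PySem.List.pyGetD nums i 0 + PySem.List.pyGetD ps (-1) 0])
    [PySem.List.pyGetD nums 0 0]
  queries.foldl
    (fun ans q =>
      let s := PySem.List.pyGetD prefix_sum q.2 0 - PySem.List.pyGetD prefix_sum q.1 0
                 + PySem.List.pyGetD nums q.1 0
      ans ++ [decide (s < limit)]) []

-- ===== PORT B =====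
-- helper upto(i) = sum(nums[:i]) + nums[i], the inclusive prefix sum computed on the fly
def pvUpto (nums : List Int) (i : Int) : Int :=
  (PySem.List.slice nums none (some i)).sum + PySem.List.pyGetD nums i 0

def problem1_alt (nums : List Int) (queries : List (Int × Int)) (limit : Int) : List Bool :=
  queries.map (fun q =>
    decide (pvUpto nums q.2 - pvUpto nums q.1 + PySem.List.pyGetD nums q.1 0 < limit))

-- ===== PRECONDITION & SPEC =====
-- Pre_ excludes exactly the inputs on which A raises an IndexError: empty nums, or a query
-- index outside Python's valid index range [-len(nums), len(nums)-1].
def Pre_problem1 (nums : List Int) (queries : List (Int × Int)) (limit : Int) : Prop :=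
  nums ≠ [] ∧ ∀ q ∈ queries,
    -(nums.length : Int) ≤ q.1 ∧ q.1 < (nums.length : Int) ∧
    -(nums.length : Int) ≤ q.2 ∧ q.2 < (nums.length : Int)
instance (nums : List Int) (queries : List (Int × Int)) (limit : Int) : Decidable (Pre_problem1 nums queries limit) := by unfold Pre_problem1; infer_instance

def pvWitness_problem1 : List Int × (List (Int × Int)) × Int := ([1, 2, 3], [(0, 2), (-3, 1), (2, -1)], 4)

def Spec_problem1 (nums : List Int) (queries : List (Int × Int)) (limit : Int) (out : List Bool) : Prop := out = problem1_alt nums queries limit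
instance (nums : List Int) (queries : List (Int × Int)) (limit : Int) (out : List Bool) : Decidable (Spec_problem1 nums queries limit out) := by unfold Spec_problem1; infer_instance

-- ===== CLAIM (what is proved, stated in full; the proofs are below) =====
def Claim_equal_problem1 : Prop := ∀ (nums : List Int) (queries : List (Int × Int)) (limit : Int), Dom_problem1 nums queries limit → Pre_problem1 nums queries limit → Spec_problem1 nums queries limit (problem1 nums queries limit)


-- ===== LEMMAS AND PROOFS =====

-- Wrapped indexing: inside Python's valid index range, xs[i] is xs[(i mod n)].
theorem pv_pyGetD_wrap (xs : List Int) (i : Int) (hne : xs ≠ [])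
    (h1 : -(xs.length : Int) ≤ i) (h2 : i < (xs.length : Int)) :
    PySem.List.pyGetD xs i 0
      = xs[(i % (xs.length : Int)).toNat]'(by
          have hn : 0 < (xs.length : Int) := by
            simpa using List.length_pos_iff.mpr hne
          have h3 := Int.emod_lt_of_pos i hn
          have h4 : (0:Int) ≤ i % (xs.length : Int) := Int.emod_nonneg i (by omega)
          omega) := by
  have hn : 0 < (xs.length : Int) := by simpa using List.length_pos_iff.mpr hne
  rcases le_or_gt 0 i with hi | hi
  · have hmod : i % (xs.length : Int) = i := Int.emod_eq_of_lt hi h2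
    rw [PySem.List.pyGetD_eq_getElem xs 0 hi h2]
    simp [hmod]
  · have hk : i = -(((-i).toNat : Nat) : Int) := by omega
    have hmod : i % (xs.length : Int) = i + xs.length := by
      have h := Int.add_mul_emod_self_left (a := i) (b := (xs.length:Int)) (c := 1)
      rw [mul_one] at h
      rw [← h, Int.emod_eq_of_lt (by omega) (by omega)]
    have hg := PySem.List.pyGetD_neg_natCast xs (-i).toNat 0 (by omega) (by omega)
    rw [← hk] at hg
    rw [hg]
    congr 1
    omega

-- B's start slice: nums[:x] is the first (x mod n) elements, for x a valid index.
theorem pv_startSlice (nums : List Int) (x : Int) (hne : nums ≠ [])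
    (h1 : -(nums.length : Int) ≤ x) (h2 : x < (nums.length : Int)) :
    PySem.List.slice nums none (some x) = nums.take (x % (nums.length : Int)).toNat := by
  have hn : 0 < nums.length := List.length_pos_iff.mpr hne
  rcases le_or_gt 0 x with hx | hx
  · have hmod : x % (nums.length : Int) = x := Int.emod_eq_of_lt hx h2
    rw [PySem.List.slice_to nums hx, hmod]
  · have hk : x = -(((-x).toNat : Nat) : Int) := by omega
    have hmod : x % (nums.length : Int) = x + nums.length := by
      have h := Int.add_mul_emod_self_left (a := x) (b := (nums.length:Int)) (c := 1)
      rw [mul_one] at h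
      rw [← h, Int.emod_eq_of_lt (by omega) (by omega)]
    have hs : PySem.List.slice nums none (some x) = nums.take (nums.length - (-x).toNat) := by
      conv_lhs => rw [hk]
      exact PySem.List.slice_to_neg_natCast nums (-x).toNat (by omega)
    rw [hs]
    congr 1
    omega

-- One query: A's table-lookup difference equals B's on-the-fly inclusive prefix sums.
theorem pv_query_eq (nums : List Int) (x y : Int) (hne : nums ≠ [])
    (hx1 : -(nums.length : Int) ≤ x) (hx2 : x < (nums.length : Int))
    (hy1 : -(nums.length : Int) ≤ y) (hy2 : y < (nums.length : Int)) :
    PySem.List.pyGetD ((List.range nums.length).map (fun k => (nums.take (k + 1)).sum)) y 0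
      - PySem.List.pyGetD ((List.range nums.length).map (fun k => (nums.take (k + 1)).sum)) x 0
      + PySem.List.pyGetD nums x 0
    = pvUpto nums y - pvUpto nums x + PySem.List.pyGetD nums x 0 := by
  have hn : 0 < nums.length := List.length_pos_iff.mpr hne
  set n := nums.length with hndef
  set f : Nat → Int := fun k => (nums.take (k + 1)).sum with hf
  set pfx : List Int := (List.range n).map f with hp
  have hplen : pfx.length = n := by simp [hp]
  have hpne : pfx ≠ [] := by
    intro h0
    rw [h0] at hplen
    simp at hplen
    omega
  set px := (x % (n : Int)).toNat with hpx
  set py := (y % (n : Int)).toNat with hpy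
  have hxlt : px < n := by
    have := Int.emod_lt_of_pos x (by omega : (0:Int) < n)
    have := Int.emod_nonneg x (by omega : (n:Int) ≠ 0)
    omega
  have hylt : py < n := by
    have := Int.emod_lt_of_pos y (by omega : (0:Int) < n)
    have := Int.emod_nonneg y (by omega : (n:Int) ≠ 0)
    omega
  have hgy := pv_pyGetD_wrap pfx y hpne (by rw [hplen]; exact hy1) (by rw [hplen]; exact hy2)
  have hgx := pv_pyGetD_wrap pfx x hpne (by rw [hplen]; exact hx1) (by rw [hplen]; exact hx2)
  have hgnx := pv_pyGetD_wrap nums x hne hx1 hx2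
  have hgny := pv_pyGetD_wrap nums y hne hy1 hy2
  rw [pvUpto, pvUpto, hgy, hgx, hgnx, hgny,
      pv_startSlice nums x hne hx1 hx2, pv_startSlice nums y hne hy1 hy2]
  have hey : pfx[(y % (pfx.length : Int)).toNat]'(by rw [hplen]; simpa [hpy] using hylt) = f py := by
    simp [hp, hpy]
  have hex : pfx[(x % (pfx.length : Int)).toNat]'(by rw [hplen]; simpa [hpx] using hxlt) = f px := by
    simp [hp, hpx]
  rw [hey, hex]
  simp only [← hndef, ← hpx, ← hpy]
  have hfx : f px = (nums.take px).sum + nums[px] := by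
    rw [hf]
    simp only []
    rw [List.sum_take_succ nums px hxlt]
  have hfy : f py = (nums.take py).sum + nums[py] := by
    rw [hf]
    simp only []
    rw [List.sum_take_succ nums py hylt]
  rw [hfx, hfy]

theorem pv_prefix_ext (nums : List Int) (m : Nat) (hm : 1 ≤ m) (hmn : m ≤ nums.length) :
    (PySem.List.pyRange (m : Int) (nums.length : Int) 1).foldl
      (fun ps i => ps ++ [PySem.List.pyGetD nums i 0 + PySem.List.pyGetD ps (-1) 0])
      ((List.range m).map (fun k => (nums.take (k + 1)).sum))
    = (List.range nums.length).map (fun k => (nums.take (k + 1)).sum) := by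
  induction hd : nums.length - m generalizing m with
  | zero =>
    have : m = nums.length := by omega
    subst this
    rw [PySem.List.pyRange_one_eq_nil (by omega)]
    simp
  | succ t ih =>
    have hlt : m < nums.length := by omega
    rw [PySem.List.pyRange_one_cons (by exact_mod_cast hlt)]
    rw [List.foldl_cons]
    have hstep : (List.range m).map (fun k => (nums.take (k + 1)).sum) ++
        [PySem.List.pyGetD nums (m : Int) 0 +
         PySem.List.pyGetD ((List.range m).map (fun k => (nums.take (k + 1)).sum)) (-1) 0]
        = (List.range (m + 1)).map (fun k => (nums.take (k + 1)).sum) := by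
      have hlen : ((List.range m).map (fun k => (nums.take (k + 1)).sum)).length = m := by simp
      have hlast := PySem.List.pyGetD_neg_natCast
        ((List.range m).map (fun k => (nums.take (k + 1)).sum)) 1 0 (by omega) (by omega)
      have hml : m - 1 < m := by omega
      rw [show (-1 : Int) = -((1:Nat):Int) by norm_num] at *
      rw [hlast]
      rw [PySem.List.pyGetD_natCast, List.getD_eq_getElem nums 0 hlt]
      simp only [hlen]
      rw [List.getElem_map, List.getElem_range]
      have h1 : (m - 1) + 1 = m := by omega
      rw [h1]
      have h2 : (nums.take (m + 1)).sum = (nums.take m).sum + nums[m] := List.sum_take_succ nums m hlt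
      rw [List.range_succ, List.map_append]
      simp [h2]
      omega
    rw [hstep]
    have := ih (m + 1) (by omega) (by omega) (by omega)
    simpa using this

-- The prefix-sum table A builds is pointwise the sums of the first k+1 elements.
theorem pv_prefix_eq (nums : List Int) (h : nums ≠ []) :
    (PySem.List.pyRange 1 (nums.length : Int) 1).foldl
      (fun ps i => ps ++ [PySem.List.pyGetD nums i 0 + PySem.List.pyGetD ps (-1) 0])
      [PySem.List.pyGetD nums 0 0]
    = (List.range nums.length).map (fun k => (nums.take (k + 1)).sum) := by
  have hn : 0 < nums.length := List.length_pos_iff.mpr h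
  have hbase : [PySem.List.pyGetD nums 0 0]
      = (List.range 1).map (fun k => (nums.take (k + 1)).sum) := by
    rcases nums with _ | ⟨a, t⟩
    · simp at hn
    · simp [PySem.List.pyGetD_zero_cons]
  rw [hbase]
  have := pv_prefix_ext nums 1 (by omega) (by omega)
  simpa using this

-- ===== VERDICT (by name: the statement is the Claim_ definition above) =====
theorem problem1_spec : Claim_equal_problem1 := by
  intro nums queries limit _hdom hpre
  obtain ⟨hne, hq⟩ := hpre
  unfold Spec_problem1 problem1 problem1_alt
  simp only []
  rw [pv_prefix_eq nums hne]
  rw [PySem.List.foldl_append_singleton_eq_map (fun q : Int × Int =>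
    decide (PySem.List.pyGetD ((List.range nums.length).map (fun k => (nums.take (k + 1)).sum)) q.2 0
      - PySem.List.pyGetD ((List.range nums.length).map (fun k => (nums.take (k + 1)).sum)) q.1 0
      + PySem.List.pyGetD nums q.1 0 < limit)) queries []]
  rw [List.nil_append]
  apply List.map_congr_left
  intro q hqmem
  obtain ⟨hx1, hx2, hy1, hy2⟩ := hq q hqmem
  rw [pv_query_eq nums q.1 q.2 hne hx1 hx2 hy1 hy2]
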